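-- pv_equiv track=rewrite | github.com/adampolak/first-fit | runs/results/gen_62/original.py | clique_number
-- ===== SOURCE A (Python) =====
-- def clique_number(intervals):
--     """
--     Compute omega (maximum number of intervals covering a single point) using sweep.
--     Open intervals: endpoints do not contribute; handle right(-1) before left(+1) at ties.
--     """
--     events = []
--     for (l, r) in intervals:
--         if l >= r:
--             continue
--         events.append((l, +1))
--         events.append((r, -1))
--     if not events:
--         return 0
--     events.sort(key=lambda e: (e[0], 0 if e[1] == -1 else 1))
--     cur = 0
--     best = 0
--     for _, t in events:
--         cur += t
--         if cur > best:
--             best = cur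
--     return best
-- ===== SOURCE B (Python) =====
-- def clique_number(intervals):
--     """
--     Compute omega (max number of open intervals covering a single point) directly:
--     the max is attained just inside some interval's left endpoint, so count, for
--     each valid start l, how many valid intervals (a, b) satisfy a <= l < b.
--     """
--     valid = [(l, r) for (l, r) in intervals if l < r]
--     best = 0
--     for (l, _) in valid:
--         c = 0
--         for (a, b) in valid:
--             if a <= l < b:
--                 c += 1
--         if c > best:
--             best = c
--     return best
-- ===== Notes on version B (the rewrite author's own statement) =====
-- stated objective: alternative
-- what changed: Replaced A's build-sort-and-sweep over 2n tagged events by a direct per-start-point computation: for each valid start l it counts the valid intervals (a,b) with a <= l < b and returns the maximum, with no event list and no sort.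
import Mathlib
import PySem

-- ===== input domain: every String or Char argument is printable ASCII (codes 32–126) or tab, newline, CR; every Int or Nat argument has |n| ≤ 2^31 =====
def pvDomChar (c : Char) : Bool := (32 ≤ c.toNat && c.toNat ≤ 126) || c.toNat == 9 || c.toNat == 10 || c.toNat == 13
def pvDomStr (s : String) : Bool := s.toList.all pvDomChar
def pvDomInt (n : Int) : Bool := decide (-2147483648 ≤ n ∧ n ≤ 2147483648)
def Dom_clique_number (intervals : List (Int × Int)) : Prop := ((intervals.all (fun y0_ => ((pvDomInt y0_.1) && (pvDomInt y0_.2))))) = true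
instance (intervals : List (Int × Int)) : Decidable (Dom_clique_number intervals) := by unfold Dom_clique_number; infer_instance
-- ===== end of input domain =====

-- B replaces A's sort-based event sweep by direct per-start overlap counting (no sort); objective: alternative algorithm, not speed.

-- ===== PORT A =====
def clique_number (intervals : List (Int × Int)) : Int :=
  let events := intervals.foldl
    (fun acc p => if p.1 ≥ p.2 then acc else acc ++ [(p.1, (1 : Int)), (p.2, (-1 : Int))]) []
  if events = [] then 0
  else
    let sortedEvents := PySem.List.sorted2 events (fun e => e.1)
      (fun e => if e.2 == -1 then (0 : Int) else 1)
    (sortedEvents.foldl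
      (fun st e =>
        let cur := st.1 + e.2
        (cur, if cur > st.2 then cur else st.2)) ((0 : Int), (0 : Int))).2

-- ===== PORT B =====
def clique_number_alt (intervals : List (Int × Int)) : Int :=
  let valid := intervals.filter (fun p => decide (p.1 < p.2))
  valid.foldl
    (fun best p =>
      let c := valid.foldl (fun c q => if q.1 ≤ p.1 ∧ p.1 < q.2 then c + 1 else c) (0 : Int)
      if c > best then c else best) 0

-- ===== PRECONDITION & SPEC =====
def Spec_clique_number (intervals : List (Int × Int)) (out : Int) : Prop := out = clique_number_alt intervals
instance (intervals : List (Int × Int)) (out : Int) : Decidable (Spec_clique_number intervals out) := by unfold Spec_clique_number; infer_instance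

-- ===== CLAIM (what is proved, stated in full; the proofs are below) =====
def Claim_equal_clique_number : Prop := ∀ (intervals : List (Int × Int)), Dom_clique_number intervals → Spec_clique_number intervals (clique_number intervals)

-- ===== LEMMAS AND PROOFS =====

-- the two events an interval contributes
def pvPairEv (p : Int × Int) : List (Int × Int) := [(p.1, (1 : Int)), (p.2, (-1 : Int))]

-- single integer key realizing the lexicographic event key (coordinate, end-before-start)
def pvK (e : Int × Int) : Int := 2 * e.1 + (if e.2 == -1 then 0 else 1)

-- the valid intervals
def pvV (intervals : List (Int × Int)) : List (Int × Int) :=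
  intervals.filter (fun p => decide (p.1 < p.2))

-- number of valid intervals covering the point x
def pvCnt (W : List (Int × Int)) (x : Int) : Int :=
  (W.countP (fun q => decide (q.1 ≤ x ∧ x < q.2)) : Int)

-- maximum of the running sum over the nonempty prefixes of L, starting at cur
def pvRun : List (Int × Int) → Int → Int
  | [], cur => cur
  | e :: es, cur => max (cur + e.2) (pvRun es (cur + e.2))

theorem pv_events_eq (intervals : List (Int × Int)) :
    intervals.foldl
      (fun acc p => if p.1 ≥ p.2 then acc else acc ++ [(p.1, (1 : Int)), (p.2, (-1 : Int))]) []
      = (pvV intervals).flatMap pvPairEv := by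
  have h1 : intervals.foldl
      (fun acc p => if p.1 ≥ p.2 then acc else acc ++ [(p.1, (1 : Int)), (p.2, (-1 : Int))]) []
      = intervals.foldl (fun acc p => if p.1 < p.2 then acc ++ pvPairEv p else acc) [] := by
    apply PySem.List.foldl_congr_mem
    intro acc p _
    rcases lt_or_ge p.1 p.2 with h | h
    · simp [pvPairEv, h, not_le.mpr h]
    · simp [h, not_lt.mpr h]
  rw [h1, PySem.List.foldl_ite_eq_foldl_filter, PySem.List.foldl_append_eq_flatMap]
  simp [pvV]

theorem pv_sorted2_eq_sorted (xs : List (Int × Int)) :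
    PySem.List.sorted2 xs (fun e => e.1) (fun e => if e.2 == -1 then (0 : Int) else 1)
      = PySem.List.sorted xs pvK := by
  have h : (fun (a b : Int × Int) => decide (a.1 < b.1) ||
      (!decide (b.1 < a.1) && decide ((if a.2 == -1 then (0 : Int) else 1)
        < (if b.2 == -1 then (0 : Int) else 1))))
      = fun a b => decide (pvK a < pvK b) := by
    funext a b
    by_cases ha : a.2 == -1 <;> by_cases hb : b.2 == -1 <;>
      simp only [ha, hb, if_true, if_false, Bool.false_eq_true] <;>
        rw [← decide_not, ← Bool.decide_and, ← Bool.decide_or, decide_eq_decide] <;>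
          simp only [pvK, ha, hb, if_true, if_false, Bool.false_eq_true] <;> omega
  show xs.foldl (fun acc x => PySem.List.insertBy
      (fun (a b : Int × Int) => decide (a.1 < b.1) ||
        (!decide (b.1 < a.1) && decide ((if a.2 == -1 then (0 : Int) else 1)
          < (if b.2 == -1 then (0 : Int) else 1)))) x acc) []
    = xs.foldl (fun acc x => PySem.List.insertBy (fun a b => decide (pvK a < pvK b)) x acc) []
  rw [h]

theorem pv_fold_best (L : List (Int × Int)) (cur best : Int) :
    (L.foldl
      (fun st e =>
        let c := st.1 + e.2
        (c, if c > st.2 then c else st.2)) (cur, best)).2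
      = if L = [] then best else max best (pvRun L cur) := by
  induction L generalizing cur best with
  | nil => simp
  | cons e es ih =>
    simp only [List.foldl_cons, pvRun, reduceCtorEq, if_false]
    rw [ih]
    rcases eq_or_ne es ([] : List (Int × Int)) with h | h <;> simp [h, pvRun] <;> omega

theorem pv_run_ge (P Q : List (Int × Int)) (cur : Int) (hP : P ≠ []) :
    cur + (P.map (fun e => e.2)).sum ≤ pvRun (P ++ Q) cur := by
  induction P generalizing cur with
  | nil => exact absurd rfl hP
  | cons e P' ih =>
    simp only [List.cons_append, pvRun, List.map_cons, List.sum_cons]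
    rcases eq_or_ne P' ([] : List (Int × Int)) with h | h
    · subst h; simp [pvRun]
    · have := ih (cur + e.2) h
      omega

theorem pv_run_le (L : List (Int × Int)) (cur b : Int) (hL : L ≠ [])
    (h : ∀ P Q, L = P ++ Q → P ≠ [] → cur + (P.map (fun e => e.2)).sum ≤ b) :
    pvRun L cur ≤ b := by
  induction L generalizing cur with
  | nil => exact absurd rfl hL
  | cons e es ih =>
    simp only [pvRun]
    have h1 : cur + e.2 ≤ b := by simpa using h [e] es rfl (by simp)
    apply max_le h1
    rcases eq_or_ne es ([] : List (Int × Int)) with he | he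
    · subst he; simpa [pvRun] using h1
    · refine ih (cur + e.2) he (fun P Q hPQ hPne => ?_)
      have := h (e :: P) Q (by simp [hPQ]) (by simp)
      simp only [List.map_cons, List.sum_cons] at this
      omega

theorem pv_mem_flatMap_shape {e : Int × Int} {W : List (Int × Int)}
    (h : e ∈ W.flatMap pvPairEv) : ∃ p ∈ W, e = (p.1, (1 : Int)) ∨ e = (p.2, (-1 : Int)) := by
  rw [List.mem_flatMap] at h
  obtain ⟨p, hp, he⟩ := h
  exact ⟨p, hp, by simpa [pvPairEv] using he⟩

theorem pv_sum_filter_flatMap (W : List (Int × Int)) (x : Int) (hW : ∀ q ∈ W, q.1 < q.2) :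
    (((W.flatMap pvPairEv).filter (fun e => decide (pvK e ≤ 2 * x + 1))).map (fun e => e.2)).sum
      = pvCnt W x := by
  induction W with
  | nil => simp [pvCnt]
  | cons w W' ih =>
    have hw : w.1 < w.2 := hW w (by simp)
    have ih' := ih (fun q hq => hW q (List.mem_cons_of_mem _ hq))
    simp only [List.flatMap_cons, pvPairEv, List.filter_append, List.map_append,
      List.sum_append, ih', pvCnt, List.countP_cons]
    have e1 : pvK (w.1, (1 : Int)) = 2 * w.1 + 1 := rfl
    have e2 : pvK (w.2, (-1 : Int)) = 2 * w.2 + 0 := rfl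
    have k1 : (decide (pvK (w.1, (1 : Int)) ≤ 2 * x + 1)) = decide (w.1 ≤ x) := by
      rw [e1, decide_eq_decide]; omega
    have k2 : (decide (pvK (w.2, (-1 : Int)) ≤ 2 * x + 1)) = decide (w.2 ≤ x) := by
      rw [e2, decide_eq_decide]; omega
    simp only [List.filter_cons, List.filter_nil, k1, k2, decide_eq_true_eq]
    split_ifs <;> simp <;> push_cast <;> omega

theorem pv_countP_starts (W : List (Int × Int)) (x : Int) :
    (W.flatMap pvPairEv).countP (fun e => e.2 == 1 && decide (e.1 ≤ x))
      = W.countP (fun q => decide (q.1 ≤ x)) := by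
  induction W with
  | nil => simp
  | cons w W' ih =>
    simp only [List.flatMap_cons, List.countP_append, ih, List.countP_cons, pvPairEv]
    by_cases h : w.1 ≤ x <;> simp [h] <;> omega

theorem pv_countP_ends (W : List (Int × Int)) (x : Int) :
    (W.flatMap pvPairEv).countP (fun e => e.2 == -1 && decide (e.1 ≤ x))
      = W.countP (fun q => decide (q.2 ≤ x)) := by
  induction W with
  | nil => simp
  | cons w W' ih =>
    simp only [List.flatMap_cons, List.countP_append, ih, List.countP_cons, pvPairEv]
    by_cases h : w.2 ≤ x <;> simp [h] <;> omega

theorem pv_cnt_eq_diff (W : List (Int × Int)) (x : Int) (hW : ∀ q ∈ W, q.1 < q.2) :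
    pvCnt W x = (W.countP (fun q => decide (q.1 ≤ x)) : Int)
      - (W.countP (fun q => decide (q.2 ≤ x)) : Int) := by
  induction W with
  | nil => simp [pvCnt]
  | cons w W' ih =>
    have hw : w.1 < w.2 := hW w (by simp)
    have ih' := ih (fun q hq => hW q (List.mem_cons_of_mem _ hq))
    simp only [pvCnt, List.countP_cons, decide_eq_true_eq] at *
    split_ifs <;> push_cast <;> omega

theorem pv_sum_eq_counts (P : List (Int × Int)) (h : ∀ e ∈ P, e.2 = 1 ∨ e.2 = -1) :
    (P.map (fun e => e.2)).sum
      = (P.countP (fun e => e.2 == 1) : Int) - (P.countP (fun e => e.2 == -1) : Int) := by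
  induction P with
  | nil => simp
  | cons e P' ih =>
    have he := h e (by simp)
    have ih' := ih (fun x hx => h x (List.mem_cons_of_mem _ hx))
    simp only [List.map_cons, List.sum_cons, List.countP_cons, ih']
    rcases he with he | he <;> simp [he] <;> push_cast <;> omega

theorem pv_foldl_max_le (l : List (Int × Int)) (f : Int × Int → Int) (b : Int) :
    ∀ init, init ≤ b → (∀ x ∈ l, f x ≤ b) →
      l.foldl (fun acc x => max acc (f x)) init ≤ b := by
  induction l with
  | nil => intro init h0 _; simpa
  | cons x l' ih =>
    intro init h0 h
    simp only [List.foldl_cons]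
    exact ih _ (max_le h0 (h x (by simp))) (fun y hy => h y (List.mem_cons_of_mem _ hy))

theorem pv_sorted_filter_split (S : List (Int × Int)) (c : Int)
    (hpw : S.Pairwise (fun a b => pvK a ≤ pvK b)) :
    S = S.filter (fun e => decide (pvK e ≤ c)) ++ S.filter (fun e => !decide (pvK e ≤ c)) := by
  induction S with
  | nil => simp
  | cons a S' ih =>
    rw [List.pairwise_cons] at hpw
    by_cases ha : pvK a ≤ c
    · simp only [List.filter_cons, ha, decide_true, Bool.not_true, if_true,
        List.cons_append]
      exact congrArg (a :: ·) (ih hpw.2)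
    · have hall : ∀ b ∈ a :: S', ¬ pvK b ≤ c := by
        intro b hb
        rcases List.mem_cons.mp hb with rfl | hb
        · exact ha
        · have := hpw.1 b hb; omega
      rw [List.filter_eq_nil_iff.mpr (by intro b hb; simpa using hall b hb), List.nil_append,
        List.filter_eq_self.mpr (by intro b hb; simpa using hall b hb)]

theorem pv_alt_char (intervals : List (Int × Int)) :
    clique_number_alt intervals
      = (pvV intervals).foldl (fun best p => max best (pvCnt (pvV intervals) p.1)) 0 := by
  unfold clique_number_alt
  simp only []
  apply PySem.List.foldl_congr_mem
  intro best p _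
  rw [PySem.List.foldl_ite_add_one]
  simp only [zero_add]
  have : ((intervals.filter (fun p => decide (p.1 < p.2))).countP
      (fun q => decide (q.1 ≤ p.1 ∧ p.1 < q.2)) : Int) = pvCnt (pvV intervals) p.1 := rfl
  rw [this]
  omega

-- ===== MAIN PROOF =====

theorem pv_main (intervals : List (Int × Int)) :
    clique_number intervals = clique_number_alt intervals := by
  have hval : ∀ q ∈ pvV intervals, q.1 < q.2 := by
    intro q hq
    simpa using List.of_mem_filter hq
  simp only [clique_number, pv_events_eq]
  by_cases hVcase : pvV intervals = []
  · -- no valid intervals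
    rw [pv_alt_char, hVcase]
    simp
  · have hev : (pvV intervals).flatMap pvPairEv ≠ [] := by
      intro h
      rw [List.flatMap_eq_nil_iff] at h
      rcases hc : pvV intervals with _ | ⟨v, tV⟩
      · exact hVcase hc
      · exact absurd (h v (by rw [hc]; simp)) (by simp [pvPairEv])
    rw [if_neg hev, pv_sorted2_eq_sorted, pv_fold_best]
    have hperm : (PySem.List.sorted ((pvV intervals).flatMap pvPairEv) pvK).Perm
        ((pvV intervals).flatMap pvPairEv) := PySem.List.sorted_perm _ _ _
    set S := PySem.List.sorted ((pvV intervals).flatMap pvPairEv) pvK with hSdef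
    have hpw : S.Pairwise (fun a b => pvK a ≤ pvK b) := PySem.List.sorted_pairwise _ _
    have hSne : S ≠ [] := by
      intro h
      rw [h] at hperm
      exact hev (List.Perm.eq_nil hperm.symm)
    rw [if_neg hSne, pv_alt_char]
    set V := pvV intervals with hVdef
    set B := V.foldl (fun best p => max best (pvCnt V p.1)) 0 with hBdef
    obtain ⟨hB0, hBle⟩ := PySem.List.le_foldl_max_int V (fun p => pvCnt V p.1) 0
    -- sum over the ≤-prefix equals the coverage count
    have hsum : ∀ x : Int,
        ((S.filter (fun e => decide (pvK e ≤ 2 * x + 1))).map (fun e => e.2)).sum = pvCnt V x := by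
      intro x
      have hpf := (hperm.filter (fun e => decide (pvK e ≤ 2 * x + 1))).map (fun e => e.2)
      rw [hpf.sum_eq, pv_sum_filter_flatMap V x hval]
    have hcnt_pos : ∀ p ∈ V, (1 : Int) ≤ pvCnt V p.1 := by
      intro p hp
      have : 0 < V.countP (fun q => decide (q.1 ≤ p.1 ∧ p.1 < q.2)) := by
        rw [List.countP_pos_iff]
        exact ⟨p, hp, by simpa using hval p hp⟩
      unfold pvCnt
      omega
    -- (I)  every per-point count is reached by some prefix of the sweep
    have hI : ∀ p ∈ V, pvCnt V p.1 ≤ pvRun S 0 := by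
      intro p hp
      have hsumP := hsum p.1
      have hPne : S.filter (fun e => decide (pvK e ≤ 2 * p.1 + 1)) ≠ [] := by
        intro h
        rw [h] at hsumP
        simp at hsumP
        have := hcnt_pos p hp
        omega
      have hge := pv_run_ge (S.filter (fun e => decide (pvK e ≤ 2 * p.1 + 1)))
        (S.filter (fun e => !decide (pvK e ≤ 2 * p.1 + 1))) 0 hPne
      rw [← pv_sorted_filter_split S (2 * p.1 + 1) hpw] at hge
      omega
    -- shape of the events
    have hshape : ∀ e ∈ S, e.2 = 1 ∨ e.2 = -1 := by
      intro e he
      obtain ⟨p, _, h | h⟩ := pv_mem_flatMap_shape (hperm.mem_iff.mp he) <;> subst h <;> simp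
    -- (II)  every nonempty prefix sum is at most B
    have hII : ∀ P Q, S = P ++ Q → P ≠ [] → (P.map (fun e => e.2)).sum ≤ B := by
      intro P Q hPQ hPne
      have hshapeP : ∀ e ∈ P, e.2 = 1 ∨ e.2 = -1 :=
        fun e he => hshape e (by rw [hPQ]; exact List.mem_append_left _ he)
      rw [pv_sum_eq_counts P hshapeP]
      rcases hst : P.filter (fun e => e.2 == 1) with _ | ⟨s, t⟩
      · -- no start events in the prefix: the sum is nonpositive
        have hc0 : P.countP (fun e => e.2 == 1) = 0 :=
          List.countP_eq_zero.mpr (List.filter_eq_nil_iff.mp hst)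
        rw [hc0]
        have : (0 : Int) ≤ P.countP (fun e => e.2 == -1) := by positivity
        omega
      · -- m = largest start coordinate in the prefix
        set m := (t.map (fun e => e.1)).foldl max s.1 with hm
        have hmax := PySem.List.le_foldl_max (t.map (fun e => e.1)) s.1
        have hmem := PySem.List.foldl_max_mem (t.map (fun e => e.1)) s.1
        have hsub : ∀ e ∈ P.filter (fun e => e.2 == 1), e ∈ P ∧ e.2 = 1 := by
          intro e he
          have h1 := List.mem_of_mem_filter he
          have h2 := List.of_mem_filter he
          exact ⟨h1, by simpa using h2⟩
        have hmS : ∃ e ∈ P, e.2 = 1 ∧ e.1 = m := by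
          rcases hmem with h | h
          · obtain ⟨h1, h2⟩ := hsub s (by rw [hst]; simp)
            exact ⟨s, h1, h2, h.symm⟩
          · obtain ⟨e, het, hem⟩ := List.mem_map.mp h
            obtain ⟨h1, h2⟩ := hsub e (by rw [hst]; simp [het])
            exact ⟨e, h1, h2, hem⟩
        obtain ⟨e0, he0P, he0tag, he0m⟩ := hmS
        have hstart_le : ∀ e ∈ P, e.2 = 1 → e.1 ≤ m := by
          intro e heP hetag
          have : e ∈ P.filter (fun e => e.2 == 1) :=
            List.mem_filter.mpr ⟨heP, by simp [hetag]⟩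
          rw [hst] at this
          rcases List.mem_cons.mp this with rfl | h
          · exact hmax.1
          · exact hmax.2 _ (List.mem_map_of_mem h)
        have hPQpw : ∀ a ∈ P, ∀ b ∈ Q, pvK a ≤ pvK b := by
          have hpw' := hpw
          rw [hPQ] at hpw'
          exact fun a ha b hb => (List.pairwise_append.mp hpw').2.2 a ha b hb
        have hQend : ∀ b ∈ Q, ¬ (b.2 = -1 ∧ b.1 ≤ m) := by
          rintro b hb ⟨hbt, hbm⟩
          have h1 := hPQpw e0 he0P b hb
          have ke0 : pvK e0 = 2 * m + 1 := by simp [pvK, he0tag, he0m]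
          have kb : pvK b = 2 * b.1 := by simp [pvK, hbt]
          omega
        -- starts of P, counted with their coordinate bound
        have hcS : P.countP (fun e => e.2 == 1)
            = P.countP (fun e => e.2 == 1 && decide (e.1 ≤ m)) := by
          apply List.countP_congr
          intro e he
          constructor
          · intro h
            have ht : e.2 = 1 := by simpa using h
            simp [ht, hstart_le e he ht]
          · intro h
            simp only [Bool.and_eq_true] at h
            exact h.1
        have hcS_le : P.countP (fun e => e.2 == 1 && decide (e.1 ≤ m))
            ≤ V.countP (fun q => decide (q.1 ≤ m)) := by
          rw [← pv_countP_starts V m, ← List.Perm.countP_eq _ hperm, hPQ, List.countP_append]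
          omega
        have hcE_ge : V.countP (fun q => decide (q.2 ≤ m))
            ≤ P.countP (fun e => e.2 == -1) := by
          have h1 := pv_countP_ends V m
          have h2 := List.Perm.countP_eq (fun e => e.2 == -1 && decide (e.1 ≤ m)) hperm
          have hQ0 : Q.countP (fun e => e.2 == -1 && decide (e.1 ≤ m)) = 0 := by
            rw [List.countP_eq_zero]
            intro b hb
            simpa using hQend b hb
          have h3 : P.countP (fun e => e.2 == -1 && decide (e.1 ≤ m))
              ≤ P.countP (fun e => e.2 == -1) :=
            List.countP_mono_left (by intro e _ h; simp only [Bool.and_eq_true] at h; exact h.1)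
          rw [hPQ, List.countP_append, hQ0] at h2
          omega
        -- m is a start coordinate of a valid interval
        have hm_cnt : pvCnt V m ≤ B := by
          have he0ev : e0 ∈ V.flatMap pvPairEv :=
            hperm.mem_iff.mp (by rw [hPQ]; exact List.mem_append_left _ he0P)
          obtain ⟨p, hpV, h | h⟩ := pv_mem_flatMap_shape he0ev
          · have hpm : p.1 = m := by rw [h] at he0m; simpa using he0m
            rw [← hpm]
            exact hBle p hpV
          · rw [h] at he0tag
            simp at he0tag
        have hdiff := pv_cnt_eq_diff V m hval
        rw [hcS]
        omega
    -- combine the two directions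
    have hAgeB : B ≤ max 0 (pvRun S 0) := by
      apply pv_foldl_max_le V (fun p => pvCnt V p.1) (max 0 (pvRun S 0)) 0 (le_max_left _ _)
      exact fun p hp => le_trans (hI p hp) (le_max_right _ _)
    have hAleB : max 0 (pvRun S 0) ≤ B := by
      apply max_le hB0
      exact pv_run_le S 0 B hSne (fun P Q h hne => by simpa using hII P Q h hne)
    omega

-- ===== VERDICT (by name: the statement is the Claim_ definition above) =====
theorem clique_number_spec : Claim_equal_clique_number := by
  intro intervals _
  unfold Spec_clique_number
  exact pv_main intervals
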